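-- pv_equiv track=rewrite | github.com/mohamadsolkhannawawi/informatics-practicum-portfolio | Semester-1/07-Programming-Fundamentals/pythonTest1.py | DNAtoBinary
-- ===== SOURCE A (Python) =====
-- def konso(e,L):
--     if L == []:
--         return [e]
--     else:
--         return [e] + L
--
-- def FirstElmt(L):
--     if L == []:
--         return None
--     else:
--         return L[0]
--
-- def tail(L):
--     if L == []:
--         return []
--     else:
--         return L[1:]
--
-- def DNAtoBinary (DNA):
--     if DNA == []:
--         return []
--     elif FirstElmt(DNA) == 'A':
--         return konso('00',DNAtoBinary(tail(DNA)))
--     elif FirstElmt(DNA) == 'C':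
--         return konso('01',DNAtoBinary(tail(DNA)))
--     elif FirstElmt(DNA) == 'G':
--         return konso('10',DNAtoBinary(tail(DNA)))
--     else:
--         return konso('11',DNAtoBinary(tail(DNA)))
-- ===== SOURCE B (Python) =====
-- _CODE = {'A': '00', 'C': '01', 'G': '10'}
--
-- def DNAtoBinary(DNA):
--     result = []
--     for base in DNA:
--         result.append(_CODE.get(base, '11'))
--     return result
-- ===== Notes on version B (the rewrite author's own statement) =====
-- stated objective: faster
-- what changed: Replaces structural recursion via konso/FirstElmt/tail helpers (each step copying the remaining list with slicing and [e]+L concatenation) with a single iterative loop appending dict-looked-up 2-bit codes to an accumulator list.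
import Mathlib
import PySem

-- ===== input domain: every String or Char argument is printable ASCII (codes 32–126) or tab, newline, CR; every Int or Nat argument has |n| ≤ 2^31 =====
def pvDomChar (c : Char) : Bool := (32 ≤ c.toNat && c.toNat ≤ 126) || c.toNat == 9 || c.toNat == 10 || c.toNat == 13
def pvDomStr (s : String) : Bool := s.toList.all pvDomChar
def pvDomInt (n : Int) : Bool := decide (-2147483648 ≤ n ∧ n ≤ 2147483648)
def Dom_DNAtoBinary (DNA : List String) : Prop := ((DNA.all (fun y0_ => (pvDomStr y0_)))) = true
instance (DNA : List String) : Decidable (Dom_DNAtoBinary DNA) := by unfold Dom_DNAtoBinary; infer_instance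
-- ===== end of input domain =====

-- B replaces A's structural recursion (konso/FirstElmt/tail helpers) by a single
-- left-to-right loop appending dict-looked-up codes to an accumulator (objective: simpler).

-- ===== PORT A =====
def konso (e : String) (L : List String) : List String :=
  if L = [] then [e] else [e] ++ L

def firstElmt (L : List String) : Option String :=
  if L = [] then none else some (L.headI)

def tailFn (L : List String) : List String :=
  if L = [] then [] else L.drop 1

theorem tailFn_lt (L : List String) (h : ¬ L = []) : (tailFn L).length < L.length := by
  cases L with
  | nil => simp at h
  | cons x xs => simp [tailFn]

def DNAtoBinary (DNA : List String) : List String :=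
  if h : DNA = [] then []
  else if firstElmt DNA = some "A" then konso "00" (DNAtoBinary (tailFn DNA))
  else if firstElmt DNA = some "C" then konso "01" (DNAtoBinary (tailFn DNA))
  else if firstElmt DNA = some "G" then konso "10" (DNAtoBinary (tailFn DNA))
  else konso "11" (DNAtoBinary (tailFn DNA))
termination_by DNA.length
decreasing_by all_goals exact tailFn_lt DNA h

-- ===== PORT B =====
def codeTable : PySem.Dict String String :=
  PySem.Dict.ofList [("A", "00"), ("C", "01"), ("G", "10")]

def DNAtoBinary_alt (DNA : List String) : List String :=
  DNA.foldl (fun result base => result ++ [PySem.Dict.getD codeTable base "11"]) []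

-- ===== PRECONDITION & SPEC =====
def Spec_DNAtoBinary (DNA : List String) (out : List String) : Prop := out = DNAtoBinary_alt DNA
instance (DNA : List String) (out : List String) : Decidable (Spec_DNAtoBinary DNA out) := by unfold Spec_DNAtoBinary; infer_instance

-- ===== CLAIM (what is proved, stated in full; the proofs are below) =====
def Claim_equal_DNAtoBinary : Prop := ∀ (DNA : List String), Dom_DNAtoBinary DNA → Spec_DNAtoBinary DNA (DNAtoBinary DNA)

-- ===== LEMMAS AND PROOFS =====
theorem konso_eq (e : String) (L : List String) : konso e L = e :: L := by
  unfold konso; split <;> simp_all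

theorem alt_foldl (acc : List String) (DNA : List String) :
    DNA.foldl (fun result base => result ++ [PySem.Dict.getD codeTable base "11"]) acc
      = acc ++ DNA.map (fun base => PySem.Dict.getD codeTable base "11") := by
  induction DNA generalizing acc with
  | nil => simp
  | cons x xs ih => simp [List.foldl, ih]

theorem alt_cons (x : String) (xs : List String) :
    DNAtoBinary_alt (x :: xs) = PySem.Dict.getD codeTable x "11" :: DNAtoBinary_alt xs := by
  unfold DNAtoBinary_alt
  rw [alt_foldl, alt_foldl]
  simp

theorem a_eq_b (DNA : List String) : DNAtoBinary DNA = DNAtoBinary_alt DNA := by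
  induction DNA with
  | nil => simp [DNAtoBinary, DNAtoBinary_alt]
  | cons x xs ih =>
    rw [DNAtoBinary, alt_cons]
    have htail : tailFn (x :: xs) = xs := by simp [tailFn]
    by_cases hA : x = "A"
    · subst hA
      simp [firstElmt, konso_eq, htail, ih]
      decide
    · by_cases hC : x = "C"
      · subst hC
        simp [firstElmt, konso_eq, htail, ih]
        decide
      · by_cases hG : x = "G"
        · subst hG
          simp [firstElmt, konso_eq, htail, ih]
          decide
        · have hcode : PySem.Dict.getD codeTable x "11" = "11" := by
            simp [codeTable, PySem.Dict.getD, PySem.Dict.ofList, PySem.Dict.update,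
              PySem.Dict.insert, PySem.Dict.empty, 
              Ne.symm hA, Ne.symm hC, Ne.symm hG, PySem.Dict.get?]
          simp [firstElmt, konso_eq, htail, ih, hA, hC, hG, hcode]

-- ===== VERDICT (by name: the statement is the Claim_ definition above) =====
theorem DNAtoBinary_spec : Claim_equal_DNAtoBinary := by
  intro DNA _
  unfold Spec_DNAtoBinary
  exact a_eq_b DNA
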